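-- pv_equiv track=rewrite | github.com/firepooh/CAN_CONVERTOR | conv_vspy.py | remove_duplicate_reqid_and_next
-- ===== SOURCE A (Python) =====
-- def remove_duplicate_reqid_and_next(data, reqid):
--     filtered_lines = []
--     skip_next = False
--     seen_lines = set()
--
--     for i in range(len(data)):
--         line = data[i]
--         if skip_next:
--             skip_next = False
--             continue
--
--         if line.startswith(reqid):
--             if line in seen_lines:
--                 skip_next = True  # 다음 라인도 삭제
--                 continue
--             seen_lines.add(line)
--         filtered_lines.append(line)
--
--     return filtered_lines
-- ===== SOURCE B (Python) =====
-- def remove_duplicate_reqid_and_next(data, reqid):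
--     # Pass 1: mark indices to drop; pass 2: filter by index.
--     seen = set()
--     remove = set()
--     for i, line in enumerate(data):
--         if i in remove:
--             continue
--         if line.startswith(reqid):
--             if line in seen:
--                 remove.add(i)
--                 remove.add(i + 1)
--             else:
--                 seen.add(line)
--     return [line for j, line in enumerate(data) if j not in remove]
-- ===== Notes on version B (the rewrite author's own statement) =====
-- stated objective: alternative
-- what changed: Replaces the single append-as-you-go pass with a skip_next flag by an index-marking pass that records a set of indices to drop (a duplicate reqid line and its successor) followed by a separate filtering comprehension over enumerate(data).
import Mathlib
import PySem

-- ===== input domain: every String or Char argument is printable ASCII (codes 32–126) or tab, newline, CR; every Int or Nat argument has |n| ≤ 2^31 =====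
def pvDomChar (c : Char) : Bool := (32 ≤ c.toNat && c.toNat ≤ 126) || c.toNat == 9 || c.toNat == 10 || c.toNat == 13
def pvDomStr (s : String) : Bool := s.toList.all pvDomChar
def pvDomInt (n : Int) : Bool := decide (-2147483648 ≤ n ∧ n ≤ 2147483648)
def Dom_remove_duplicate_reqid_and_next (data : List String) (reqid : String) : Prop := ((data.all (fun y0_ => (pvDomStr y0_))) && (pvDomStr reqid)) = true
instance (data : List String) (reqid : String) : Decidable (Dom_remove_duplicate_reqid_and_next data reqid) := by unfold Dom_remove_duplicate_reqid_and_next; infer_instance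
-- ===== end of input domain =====

-- B replaces A's single pass with a skip_next flag by an index-marking pass (a set of
-- indices to drop) followed by a separate filtering pass over enumerate(data); same cost.


-- ===== PORT A =====
-- A's loop: walk the lines with the skip_next flag and the seen set, emitting kept lines.
def aLoop (reqid : String) : List String → Bool → PySem.Set String → List String
  | [], _, _ => []
  | line :: rest, skipNext, seen =>
    if skipNext then aLoop reqid rest false seen
    else if PySem.Str.startswith line reqid then
      if PySem.Set.contains seen line then aLoop reqid rest true seen
      else line :: aLoop reqid rest false (PySem.Set.add seen line)
    else line :: aLoop reqid rest false seen

def remove_duplicate_reqid_and_next (data : List String) (reqid : String) : List String :=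
  aLoop reqid data false PySem.Set.empty

-- ===== PORT B =====
-- B's pass 1: over enumerate(data), build the set of indices to remove.
def altMark (reqid : String) : List (Int × String) → PySem.Set String → PySem.Set Int → PySem.Set Int
  | [], _, remove => remove
  | (i, line) :: rest, seen, remove =>
    if PySem.Set.contains remove i then altMark reqid rest seen remove
    else if PySem.Str.startswith line reqid then
      if PySem.Set.contains seen line then
        altMark reqid rest seen (PySem.Set.add (PySem.Set.add remove i) (i + 1))
      else altMark reqid rest (PySem.Set.add seen line) remove
    else altMark reqid rest seen remove

def remove_duplicate_reqid_and_next_alt (data : List String) (reqid : String) : List String :=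
  let remove := altMark reqid (PySem.List.enumerate data 0) PySem.Set.empty PySem.Set.empty
  ((PySem.List.enumerate data 0).filter (fun p => !(PySem.Set.contains remove p.1))).map (·.2)

-- ===== PRECONDITION & SPEC =====
def Spec_remove_duplicate_reqid_and_next (data : List String) (reqid : String) (out : List String) : Prop := out = remove_duplicate_reqid_and_next_alt data reqid
instance (data : List String) (reqid : String) (out : List String) : Decidable (Spec_remove_duplicate_reqid_and_next data reqid out) := by unfold Spec_remove_duplicate_reqid_and_next; infer_instance

-- ===== CLAIM (what is proved, stated in full; the proofs are below) =====
def Claim_equal_remove_duplicate_reqid_and_next : Prop := ∀ (data : List String) (reqid : String), Dom_remove_duplicate_reqid_and_next data reqid → Spec_remove_duplicate_reqid_and_next data reqid (remove_duplicate_reqid_and_next data reqid)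

-- ===== LEMMAS AND PROOFS =====

-- Step equations for altMark on a cons cell (one per branch of B's first pass).
theorem altMark_cons_skip (reqid line : String) (rest : List (Int × String)) (i : Int)
    (seen : PySem.Set String) (R : PySem.Set Int) (h : i ∈ R) :
    altMark reqid ((i, line) :: rest) seen R = altMark reqid rest seen R := by
  simp [altMark, h]

theorem altMark_cons_dup (reqid line : String) (rest : List (Int × String)) (i : Int)
    (seen : PySem.Set String) (R : PySem.Set Int) (h : i ∉ R)
    (hsw : PySem.Str.startswith line reqid = true) (hs : line ∈ seen) :
    altMark reqid ((i, line) :: rest) seen R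
      = altMark reqid rest seen (PySem.Set.add (PySem.Set.add R i) (i + 1)) := by
  have hsw2 : PySem.Chars.startswith line.toList reqid.toList = true := by simpa using hsw
  simp [altMark, h, hsw2, hs]

theorem altMark_cons_fresh (reqid line : String) (rest : List (Int × String)) (i : Int)
    (seen : PySem.Set String) (R : PySem.Set Int) (h : i ∉ R)
    (hsw : PySem.Str.startswith line reqid = true) (hs : line ∉ seen) :
    altMark reqid ((i, line) :: rest) seen R
      = altMark reqid rest (PySem.Set.add seen line) R := by
  have hsw2 : PySem.Chars.startswith line.toList reqid.toList = true := by simpa using hsw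
  simp [altMark, h, hsw2, hs]

theorem altMark_cons_other (reqid line : String) (rest : List (Int × String)) (i : Int)
    (seen : PySem.Set String) (R : PySem.Set Int) (h : i ∉ R)
    (hsw : PySem.Str.startswith line reqid = false) :
    altMark reqid ((i, line) :: rest) seen R = altMark reqid rest seen R := by
  have hsw2 : PySem.Chars.startswith line.toList reqid.toList = false := by simpa using hsw
  simp [altMark, h, hsw2]

-- altMark only ever adds indices: membership is monotone.
theorem contains_altMark_mono (reqid : String) (l : List (Int × String)) (j : Int) :
    ∀ (seen : PySem.Set String) (R : PySem.Set Int), j ∈ R → j ∈ altMark reqid l seen R := by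
  induction l with
  | nil => intro seen R h; exact h
  | cons p rest ih =>
    intro seen R h
    obtain ⟨i, line⟩ := p
    by_cases h1 : i ∈ R
    · rw [altMark_cons_skip reqid line rest i seen R h1]; exact ih seen R h
    · by_cases hsw : PySem.Str.startswith line reqid = true
      · by_cases hs : line ∈ seen
        · rw [altMark_cons_dup reqid line rest i seen R h1 hsw hs]
          exact ih seen _ (by simp [PySem.Set.mem_add]; tauto)
        · rw [altMark_cons_fresh reqid line rest i seen R h1 hsw hs]; exact ih _ R h
      · rw [altMark_cons_other reqid line rest i seen R h1 (by simpa using hsw)]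
        exact ih seen R h

-- altMark over indices all greater than j never adds j.
theorem contains_altMark_lt (reqid : String) (l : List (Int × String)) (j : Int) :
    ∀ (seen : PySem.Set String) (R : PySem.Set Int),
      (∀ p ∈ l, j < p.1) → j ∉ R → j ∉ altMark reqid l seen R := by
  induction l with
  | nil => intro seen R _ h; exact h
  | cons p rest ih =>
    intro seen R hl h
    obtain ⟨i, line⟩ := p
    have hji : j < i := hl (i, line) (by simp)
    have hl' : ∀ p ∈ rest, j < p.1 := fun p hp => hl p (by simp [hp])
    by_cases h1 : i ∈ R
    · rw [altMark_cons_skip reqid line rest i seen R h1]; exact ih seen R hl' h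
    · by_cases hsw : PySem.Str.startswith line reqid = true
      · by_cases hs : line ∈ seen
        · rw [altMark_cons_dup reqid line rest i seen R h1 hsw hs]
          refine ih seen _ hl' ?_
          simp only [PySem.Set.mem_add]
          push Not
          exact ⟨⟨h, by omega⟩, by omega⟩
        · rw [altMark_cons_fresh reqid line rest i seen R h1 hsw hs]; exact ih _ R hl' h
      · rw [altMark_cons_other reqid line rest i seen R h1 (by simpa using hsw)]
        exact ih seen R hl' h

-- Every index in enumerate rest (i+1) exceeds i.
theorem enumerate_fst_lt (rest : List String) (i : Int) :
    ∀ p ∈ PySem.List.enumerate rest (i + 1), i < p.1 := by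
  intro p hp
  rw [PySem.List.mem_enumerate_iff] at hp
  obtain ⟨k, hk, rfl⟩ := hp
  simp; omega

-- Main invariant: filtering the suffix by the final remove-set equals A's loop on the
-- suffix, provided R holds no index beyond the current one (so skip_next ↔ i ∈ R).
theorem mark_filter_eq (reqid : String) (rest : List String) :
    ∀ (i : Int) (seen : PySem.Set String) (R : PySem.Set Int), (∀ j ∈ R, j ≤ i) →
    ((PySem.List.enumerate rest i).filter
        (fun p => !(PySem.Set.contains (altMark reqid (PySem.List.enumerate rest i) seen R) p.1))).map (·.2)
      = aLoop reqid rest (PySem.Set.contains R i) seen := by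
  induction rest with
  | nil => intro i seen R _; simp [PySem.List.enumerate_nil, altMark, aLoop]
  | cons line rest ih =>
    intro i seen R hR
    rw [PySem.List.enumerate_cons]
    have hnext := enumerate_fst_lt rest i
    have hi1 : i + 1 ∉ R := fun h => by have := hR _ h; omega
    have hRi1 : PySem.Set.contains R (i + 1) = false := by
      simp [hi1]
    have hR' : ∀ j ∈ R, j ≤ i + 1 := fun j hj => by have := hR j hj; omega
    by_cases hskip : i ∈ R
    · -- skip_next = true: head dropped (i stays in the final set), tail continues clean
      have hRc : PySem.Set.contains R i = true := by simp [hskip]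
      rw [altMark_cons_skip reqid line _ i seen R hskip, hRc]
      have hmem : i ∈ altMark reqid (PySem.List.enumerate rest (i + 1)) seen R :=
        contains_altMark_mono reqid _ i seen R hskip
      rw [List.filter_cons_of_neg (by simp [hmem])]
      have := ih (i + 1) seen R hR'
      rw [hRi1] at this
      rw [this]
      simp [aLoop]
    · have hRc : PySem.Set.contains R i = false := by simp [hskip]
      rw [hRc]
      by_cases hsw : PySem.Str.startswith line reqid = true
      · by_cases hseen : line ∈ seen
        · -- duplicate: drop head, mark i and i+1; tail runs with skip_next = true
          rw [altMark_cons_dup reqid line _ i seen R hskip hsw hseen]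
          set R2 := PySem.Set.add (PySem.Set.add R i) (i + 1) with hR2
          have hmem : i ∈ altMark reqid (PySem.List.enumerate rest (i + 1)) seen R2 :=
            contains_altMark_mono reqid _ i seen R2 (by simp [hR2, PySem.Set.mem_add])
          have hR2le : ∀ j ∈ R2, j ≤ i + 1 := by
            intro j hj
            simp only [hR2, PySem.Set.mem_add] at hj
            rcases hj with (hj | rfl) | rfl
            · have := hR j hj; omega
            · omega
            · omega
          have hR2i1 : PySem.Set.contains R2 (i + 1) = true := by
            simp [hR2, PySem.Set.mem_add]
          rw [List.filter_cons_of_neg (by simp [hmem])]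
          have := ih (i + 1) seen R2 hR2le
          rw [hR2i1] at this
          rw [this]
          have hsw2 : PySem.Chars.startswith line.toList reqid.toList = true := by simpa using hsw
          simp [aLoop, hsw2, hseen]
        · -- fresh reqid line: keep head, add it to seen
          rw [altMark_cons_fresh reqid line _ i seen R hskip hsw hseen]
          have hnot : i ∉ altMark reqid (PySem.List.enumerate rest (i + 1)) (PySem.Set.add seen line) R :=
            contains_altMark_lt reqid _ i (PySem.Set.add seen line) R hnext hskip
          rw [List.filter_cons_of_pos (by simp [hnot])]
          simp only [List.map_cons]
          have := ih (i + 1) (PySem.Set.add seen line) R hR'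
          rw [hRi1] at this
          rw [this]
          have hsw2 : PySem.Chars.startswith line.toList reqid.toList = true := by simpa using hsw
          simp [aLoop, hsw2, hseen]
      · -- non-reqid line: keep head, state unchanged
        have hsw' : PySem.Str.startswith line reqid = false := by simpa using hsw
        rw [altMark_cons_other reqid line _ i seen R hskip hsw']
        have hnot : i ∉ altMark reqid (PySem.List.enumerate rest (i + 1)) seen R :=
          contains_altMark_lt reqid _ i seen R hnext hskip
        rw [List.filter_cons_of_pos (by simp [hnot])]
        simp only [List.map_cons]
        have := ih (i + 1) seen R hR'
        rw [hRi1] at this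
        rw [this]
        have hsw2 : PySem.Chars.startswith line.toList reqid.toList = false := by simpa using hsw'
        simp [aLoop, hsw2]

-- ===== VERDICT (by name: the statement is the Claim_ definition above) =====
theorem remove_duplicate_reqid_and_next_spec : Claim_equal_remove_duplicate_reqid_and_next := by
  intro data reqid _
  unfold Spec_remove_duplicate_reqid_and_next remove_duplicate_reqid_and_next remove_duplicate_reqid_and_next_alt
  have := mark_filter_eq reqid data 0 PySem.Set.empty PySem.Set.empty (by simp [PySem.Set.empty])
  rw [show PySem.Set.contains PySem.Set.empty (0:Int) = false from rfl] at this
  exact this.symm
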